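-- pv_equiv track=rewrite | github.com/tedunderwood/GenreProject | python/reception/poetry/lineardiction.py | add_genres
-- ===== SOURCE A (Python) =====
-- from collections import Counter
--
-- def add_genres(genrelist):
--     newcounts = dict()
--     for genre in genrelist:
--         for year, wordcounts in genre.items():
--             if year in newcounts:
--                 for word, count in wordcounts.items():
--                     newcounts[year][word] += count
--             else:
--                 newcounts[year] = Counter()
--                 for word, count in wordcounts.items():
--                     newcounts[year][word] += count
--
--     return newcounts
-- ===== SOURCE B (Python) =====
-- from collections import Counter
--
-- def add_genres(genrelist):
--     # Pass 1: group the wordcount dicts by year (dicts keep first-seen year order).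
--     buckets = {}
--     for genre in genrelist:
--         for year, wordcounts in genre.items():
--             buckets.setdefault(year, []).append(wordcounts)
--     # Pass 2: merge each year's wordcount dicts into one Counter via update.
--     newcounts = {}
--     for year, group in buckets.items():
--         c = Counter()
--         for wordcounts in group:
--             c.update(wordcounts)
--         newcounts[year] = c
--     return newcounts
-- ===== Notes on version B (the rewrite author's own statement) =====
-- stated objective: alternative
-- what changed: A interleaves merging into one pass (per year-entry, branch on whether the year is already present and add word counts immediately); B decomposes into two passes: first group the wordcount dicts into per-year buckets, then merge each bucket into a fresh Counter via update, which preserves zero and negative counts exactly.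
import Mathlib
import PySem

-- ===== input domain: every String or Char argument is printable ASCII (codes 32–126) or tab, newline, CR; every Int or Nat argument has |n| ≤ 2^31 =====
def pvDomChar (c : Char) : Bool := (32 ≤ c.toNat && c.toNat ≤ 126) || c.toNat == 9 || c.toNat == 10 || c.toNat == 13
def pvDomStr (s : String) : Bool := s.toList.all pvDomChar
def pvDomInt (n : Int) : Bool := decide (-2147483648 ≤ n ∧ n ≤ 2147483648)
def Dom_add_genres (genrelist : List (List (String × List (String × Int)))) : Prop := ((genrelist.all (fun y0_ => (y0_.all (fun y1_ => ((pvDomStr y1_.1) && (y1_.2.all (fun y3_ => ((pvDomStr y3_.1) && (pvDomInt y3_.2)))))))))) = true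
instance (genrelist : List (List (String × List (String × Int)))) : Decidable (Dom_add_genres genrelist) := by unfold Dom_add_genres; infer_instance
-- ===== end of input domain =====

-- B replaces A's single interleaved pass by a group-then-merge decomposition:
-- first bucket the wordcount dicts by year, then merge each bucket with Counter.update
-- (objective: alternative decomposition; same asymptotic cost).

-- ===== PORT A =====
def add_genres (genrelist : List (List (String × List (String × Int)))) : List (String × List (String × Int)) :=
  let newcounts : PySem.Dict String (PySem.Dict String Int) :=
    genrelist.foldl (fun nc genre =>
      (PySem.Dict.ofList genre).items.foldl (fun nc yp =>
        if nc.contains yp.1 then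
          (PySem.Dict.ofList yp.2).items.foldl
            (fun nc wp => nc.insert yp.1 ((nc.getD yp.1 PySem.Dict.empty).modify wp.1 0 (· + wp.2))) nc
        else
          (PySem.Dict.ofList yp.2).items.foldl
            (fun nc wp => nc.insert yp.1 ((nc.getD yp.1 PySem.Dict.empty).modify wp.1 0 (· + wp.2)))
            (nc.insert yp.1 PySem.Dict.empty)) nc) PySem.Dict.empty
  newcounts.items.map (fun p => (p.1, p.2.items))

-- ===== PORT B =====
-- Counter.update with a mapping: c[w] += n for each item, zero/negative counts kept.
def pvCUpd (c : PySem.Dict String Int) (wc : List (String × Int)) : PySem.Dict String Int :=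
  wc.foldl (fun c wp => c.modify wp.1 0 (· + wp.2)) c

def add_genres_alt (genrelist : List (List (String × List (String × Int)))) : List (String × List (String × Int)) :=
  let buckets : PySem.Dict String (List (List (String × Int))) :=
    genrelist.foldl (fun b genre =>
      (PySem.Dict.ofList genre).items.foldl (fun b yp =>
        b.modify yp.1 [] (· ++ [(PySem.Dict.ofList yp.2).items])) b) PySem.Dict.empty
  buckets.items.map (fun p => (p.1, (p.2.foldl pvCUpd PySem.Dict.empty).items))

-- ===== PRECONDITION & SPEC =====
def Spec_add_genres (genrelist : List (List (String × List (String × Int)))) (out : List (String × List (String × Int))) : Prop := out = add_genres_alt genrelist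
instance (genrelist : List (List (String × List (String × Int)))) (out : List (String × List (String × Int))) : Decidable (Spec_add_genres genrelist out) := by unfold Spec_add_genres; infer_instance

-- ===== CLAIM (what is proved, stated in full; the proofs are below) =====
def Claim_equal_add_genres : Prop := ∀ (genrelist : List (List (String × List (String × Int)))), Dom_add_genres genrelist → Spec_add_genres genrelist (add_genres genrelist)

-- ===== LEMMAS AND PROOFS =====

-- Merge each bucket: the simulation map from B's bucket dict to A's counter dict.
def pvG (b : PySem.Dict String (List (List (String × Int)))) : PySem.Dict String (PySem.Dict String Int) :=
  PySem.Dict.mk (b.items.map (fun p => (p.1, p.2.foldl pvCUpd PySem.Dict.empty)))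

theorem keys_pvG (b : PySem.Dict String (List (List (String × Int)))) : (pvG b).keys = b.keys := by
  simp [pvG, PySem.Dict.keys]

theorem contains_pvG (b : PySem.Dict String (List (List (String × Int)))) (k : String) :
    (pvG b).contains k = b.contains k := by
  simp [pvG, PySem.Dict.contains, List.any_map, Function.comp_def]

theorem get?_pvG (b : PySem.Dict String (List (List (String × Int)))) (k : String) :
    (pvG b).get? k = (b.get? k).map (fun v => v.foldl pvCUpd PySem.Dict.empty) := by
  simp [pvG, PySem.Dict.get?, List.find?_map, Function.comp_def]

theorem pvG_insert (b : PySem.Dict String (List (List (String × Int)))) (k : String)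
    (v : List (List (String × Int))) :
    pvG (b.insert k v) = (pvG b).insert k (v.foldl pvCUpd PySem.Dict.empty) := by
  apply PySem.Dict.ext
  by_cases hc : b.contains k = true
  · rw [PySem.Dict.items_insert_of_contains _ _ ((contains_pvG b k).trans hc)]
    simp only [pvG]
    rw [PySem.Dict.items_insert_of_contains _ _ hc]
    simp only [List.map_map]
    apply List.map_congr_left
    intro p _
    by_cases hpk : p.1 = k <;> simp [hpk]
  · have hcf : b.contains k = false := by simpa using hc
    rw [PySem.Dict.items_insert_of_not_contains _ _ ((contains_pvG b k).trans hcf)]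
    simp only [pvG]
    rw [PySem.Dict.items_insert_of_not_contains _ _ hcf]
    simp

theorem map_replace_id_of_not_mem {α : Type} (l : List (String × α)) (k : String) (v : α)
    (h : k ∉ l.map Prod.fst) :
    l.map (fun p => if p.1 = k then (k, v) else p) = l := by
  induction l with
  | nil => rfl
  | cons p tl ih =>
    simp only [List.map_cons, List.mem_cons, not_or] at h
    have hpk : ¬ p.1 = k := fun he => h.1 (by simp [he])
    rw [List.map_cons, if_neg hpk, ih h.2]

theorem map_replace_id {α : Type} (l : List (String × α)) (k : String) (v : α)
    (hnd : (l.map Prod.fst).Nodup) (hm : (k, v) ∈ l) :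
    l.map (fun p => if p.1 = k then (k, v) else p) = l := by
  induction l with
  | nil => simp at hm
  | cons p tl ih =>
    simp only [List.map_cons, List.nodup_cons] at hnd
    rcases hnd with ⟨hni, hnd⟩
    rcases List.mem_cons.mp hm with he | htl
    · rw [List.map_cons, ← he, if_pos rfl,
        map_replace_id_of_not_mem tl k v (by simpa [← he] using hni)]
    · have hk : k ∈ tl.map Prod.fst := List.mem_map.mpr ⟨(k, v), htl, rfl⟩
      have hpk : ¬ p.1 = k := fun he => hni (he ▸ hk)
      rw [List.map_cons, if_neg hpk, ih hnd htl]

theorem insert_self_of_get? {ν : Type} (d : PySem.Dict String ν) (k : String) (v : ν)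
    (hnd : d.keys.Nodup) (h : d.get? k = some v) : d.insert k v = d := by
  have hc : d.contains k = true := by
    rw [PySem.Dict.contains_eq_isSome_get?, h]; rfl
  apply PySem.Dict.ext
  rw [PySem.Dict.items_insert_of_contains d v hc]
  have hm : (k, v) ∈ d.items := (PySem.Dict.get?_eq_some_iff_mem_items d k v hnd).mp h
  simp only [beq_iff_eq]
  exact map_replace_id d.items k v hnd hm

theorem innerA (wl : List (String × Int)) :
    ∀ (nc : PySem.Dict String (PySem.Dict String Int)) (y : String) (c : PySem.Dict String Int),
    nc.keys.Nodup → nc.get? y = some c →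
    wl.foldl (fun nc wp => nc.insert y ((nc.getD y PySem.Dict.empty).modify wp.1 0 (· + wp.2))) nc
      = nc.insert y (pvCUpd c wl) := by
  induction wl with
  | nil =>
    intro nc y c hnd h
    simpa [pvCUpd] using (insert_self_of_get? nc y c hnd h).symm
  | cons wp wl ih =>
    intro nc y c hnd h
    have hg : nc.getD y PySem.Dict.empty = c := PySem.Dict.getD_of_get?_eq_some nc _ h
    simp only [List.foldl_cons, hg]
    rw [ih (nc.insert y (c.modify wp.1 0 (· + wp.2))) y (c.modify wp.1 0 (· + wp.2))
        (PySem.Dict.nodup_keys_insert nc y _ hnd) (PySem.Dict.get?_insert_self nc y _),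
        PySem.Dict.insert_insert_self]
    rfl

theorem nodup_keys_modify (b : PySem.Dict String (List (List (String × Int)))) (y : String)
    (f : List (List (String × Int)) → List (List (String × Int)))
    (hnd : b.keys.Nodup) : (b.modify y [] f).keys.Nodup := by
  rw [show (b.modify y [] f) = b.insert y (f (b.getD y [])) from rfl]
  exact PySem.Dict.nodup_keys_insert b y _ hnd

theorem stepL (b : PySem.Dict String (List (List (String × Int)))) (hnd : b.keys.Nodup)
    (y : String) (wl : List (String × Int)) :
    (if (pvG b).contains y then
        wl.foldl (fun nc wp => nc.insert y ((nc.getD y PySem.Dict.empty).modify wp.1 0 (· + wp.2))) (pvG b)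
      else
        wl.foldl (fun nc wp => nc.insert y ((nc.getD y PySem.Dict.empty).modify wp.1 0 (· + wp.2)))
          ((pvG b).insert y PySem.Dict.empty))
      = pvG (b.modify y [] (· ++ [wl])) := by
  have hndG : (pvG b).keys.Nodup := by rw [keys_pvG]; exact hnd
  rw [show (b.modify y [] (· ++ [wl])) = b.insert y (b.getD y [] ++ [wl]) from rfl, pvG_insert]
  by_cases hc : b.contains y = true
  · have hs : ((b.get? y).isSome) = true := by rw [← PySem.Dict.contains_eq_isSome_get?]; exact hc
    obtain ⟨old, hold⟩ := Option.isSome_iff_exists.mp hs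
    have hgd : b.getD y [] = old := PySem.Dict.getD_of_get?_eq_some b _ hold
    have hG : (pvG b).get? y = some (old.foldl pvCUpd PySem.Dict.empty) := by
      rw [get?_pvG, hold]; rfl
    rw [if_pos (by rw [contains_pvG]; exact hc)]
    rw [innerA wl (pvG b) y _ hndG hG, hgd, List.foldl_append]
    rfl
  · have hcf : b.contains y = false := by simpa using hc
    have hgd : b.getD y [] = [] := PySem.Dict.getD_of_not_contains b [] hcf
    rw [if_neg (by rw [contains_pvG, hcf]; simp)]
    rw [innerA wl ((pvG b).insert y PySem.Dict.empty) y PySem.Dict.empty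
        (PySem.Dict.nodup_keys_insert _ y _ hndG) (PySem.Dict.get?_insert_self _ y _),
        PySem.Dict.insert_insert_self, hgd]
    rfl

theorem genreL (pairs : List (String × List (String × Int))) :
    ∀ (b : PySem.Dict String (List (List (String × Int)))), b.keys.Nodup →
    pairs.foldl (fun nc yp =>
        if nc.contains yp.1 then
          (PySem.Dict.ofList yp.2).items.foldl
            (fun nc wp => nc.insert yp.1 ((nc.getD yp.1 PySem.Dict.empty).modify wp.1 0 (· + wp.2))) nc
        else
          (PySem.Dict.ofList yp.2).items.foldl
            (fun nc wp => nc.insert yp.1 ((nc.getD yp.1 PySem.Dict.empty).modify wp.1 0 (· + wp.2)))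
            (nc.insert yp.1 PySem.Dict.empty)) (pvG b)
      = pvG (pairs.foldl (fun b yp => b.modify yp.1 [] (· ++ [(PySem.Dict.ofList yp.2).items])) b) := by
  induction pairs with
  | nil => intro b _; rfl
  | cons yp tl ih =>
    intro b hnd
    simp only [List.foldl_cons]
    rw [stepL b hnd yp.1 (PySem.Dict.ofList yp.2).items]
    exact ih _ (nodup_keys_modify b yp.1 _ hnd)

theorem topL (gl : List (List (String × List (String × Int)))) :
    ∀ (b : PySem.Dict String (List (List (String × Int)))), b.keys.Nodup →
    gl.foldl (fun nc genre =>
        (PySem.Dict.ofList genre).items.foldl (fun nc yp =>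
          if nc.contains yp.1 then
            (PySem.Dict.ofList yp.2).items.foldl
              (fun nc wp => nc.insert yp.1 ((nc.getD yp.1 PySem.Dict.empty).modify wp.1 0 (· + wp.2))) nc
          else
            (PySem.Dict.ofList yp.2).items.foldl
              (fun nc wp => nc.insert yp.1 ((nc.getD yp.1 PySem.Dict.empty).modify wp.1 0 (· + wp.2)))
              (nc.insert yp.1 PySem.Dict.empty)) nc) (pvG b)
      = pvG (gl.foldl (fun b genre =>
          (PySem.Dict.ofList genre).items.foldl (fun b yp =>
            b.modify yp.1 [] (· ++ [(PySem.Dict.ofList yp.2).items])) b) b) := by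
  induction gl with
  | nil => intro b _; rfl
  | cons genre tl ih =>
    intro b hnd
    simp only [List.foldl_cons]
    rw [genreL (PySem.Dict.ofList genre).items b hnd]
    refine ih _ ?_
    -- nodup keys preserved through the per-genre modify loop
    clear ih
    induction (PySem.Dict.ofList genre).items generalizing b with
    | nil => exact hnd
    | cons yp tl2 ih2 =>
      simp only [List.foldl_cons]
      exact ih2 _ (nodup_keys_modify b yp.1 _ hnd)

-- ===== VERDICT (by name: the statement is the Claim_ definition above) =====
theorem add_genres_spec : Claim_equal_add_genres := by
  unfold Claim_equal_add_genres
  intro gl _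
  unfold Spec_add_genres add_genres add_genres_alt
  have h := topL gl PySem.Dict.empty (by exact PySem.Dict.nodup_keys_empty)
  rw [show pvG PySem.Dict.empty = PySem.Dict.empty from rfl] at h
  rw [h]
  simp [pvG, List.map_map, Function.comp_def]
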